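-- pv_equiv track=rewrite | github.com/xKesvaL/l-h-nsi | image-pbm-mod.py | matrice
-- ===== SOURCE A (Python) =====
-- def matrice(n,p):
--     m = [[0 for j in range(n)] for i in range(p)]
--     for i in range(p):
--         black = True
--         for j in range(n):
--             if j%20 == 0:
--                 if black == True:
--                     black = False
--                 else:
--                     black = True
--             if black == True:
--                 m[i][j] = 0
--             else:
--                 m[i][j] = 1
--     return m
-- ===== SOURCE B (Python) =====
-- def matrice(n, p):
--     if p <= 0:
--         return []
--     if n <= 0:
--         row = []
--     else:
--         row = (([1] * 20 + [0] * 20) * ((n + 39) // 40))[:n]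
--     return [row[:] for _ in range(p)]
-- ===== Notes on version B (the rewrite author's own statement) =====
-- stated objective: faster
-- what changed: Replaces A's per-cell nested loops with a stateful toggle by building the stripe row once as a repeated 40-element block ([1]*20+[0]*20) sliced to length n, then replicating fresh copies for the p rows.
import Mathlib
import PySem

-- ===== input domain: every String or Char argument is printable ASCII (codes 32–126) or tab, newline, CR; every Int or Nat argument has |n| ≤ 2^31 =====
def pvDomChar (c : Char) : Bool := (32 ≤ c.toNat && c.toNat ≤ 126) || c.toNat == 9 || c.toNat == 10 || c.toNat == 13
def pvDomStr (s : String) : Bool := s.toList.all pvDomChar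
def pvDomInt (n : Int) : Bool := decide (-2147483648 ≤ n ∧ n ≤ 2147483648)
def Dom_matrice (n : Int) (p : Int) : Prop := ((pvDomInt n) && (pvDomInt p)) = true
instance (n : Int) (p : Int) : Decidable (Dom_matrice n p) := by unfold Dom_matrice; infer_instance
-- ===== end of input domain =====

-- B builds the stripe row once as a repeated 40-element block sliced to n and replicates it; A recomputes
-- each cell with a per-column toggle state. Return values only (A mutates its local matrix in place).

-- ===== PORT A =====
-- A's inner loop over j: state (black, row-so-far); each row of the zero matrix is overwritten cell by cell,
-- so the port builds each row by the same j-loop over the same toggle state.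
def matriceRowA (n : Int) : List Int :=
  ((PySem.List.pyRange 0 n 1).foldl
    (fun (st : Bool × List Int) j =>
      let black := if PySem.Int.mod j 20 == 0 then !st.1 else st.1
      (black, st.2 ++ [if black then 0 else 1]))
    (true, [])).2

def matrice (n : Int) (p : Int) : List (List Int) :=
  (PySem.List.pyRange 0 p 1).map (fun _ => matriceRowA n)

-- ===== PORT B =====
-- Python's `lst * k` is ported as flatten (replicate k lst); the slice `[:n]` with n ≥ 1 is `take n.toNat`
-- (exact for a nonnegative bound); the p value-identical row copies are ported as List.replicate.
def matrice_alt (n : Int) (p : Int) : List (List Int) :=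
  if p ≤ 0 then []
  else
    List.replicate p.toNat
      (if n ≤ 0 then ([] : List Int)
       else (List.flatten (List.replicate (PySem.Int.floordiv (n + 39) 40).toNat
               (List.replicate 20 (1 : Int) ++ List.replicate 20 0))).take n.toNat)

-- ===== PRECONDITION & SPEC =====
def Spec_matrice (n : Int) (p : Int) (out : List (List Int)) : Prop := out = matrice_alt n p
instance (n : Int) (p : Int) (out : List (List Int)) : Decidable (Spec_matrice n p out) := by
  unfold Spec_matrice; infer_instance

-- ===== CLAIM =====
def Claim_equal_matrice : Prop := ∀ (n : Int) (p : Int), Dom_matrice n p → Spec_matrice n p (matrice n p)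

-- ===== LEMMAS AND PROOFS =====

-- black state of A's toggle after processing j = 0 .. k-1 (true iff ⌈k/20⌉ is even)
def blackAfter (k : Nat) : Bool := (k + 19) / 20 % 2 == 0

lemma blackAfter_step (k : Nat) :
    blackAfter (k + 1) =
      (if PySem.Int.mod (k : Int) 20 == 0 then !blackAfter k else blackAfter k) := by
  have h : PySem.Int.mod (k : Int) 20 = ((k % 20 : Nat) : Int) :=
    PySem.Int.mod_natCast k 20
  rw [h]
  by_cases hk : k % 20 = 0
  · have h1 : (k + 1 + 19) / 20 = (k + 19) / 20 + 1 := by omega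
    rcases Nat.mod_two_eq_zero_or_one ((k + 19) / 20) with h2 | h2 <;>
      · have h3 : ((k + 19) / 20 + 1) % 2 = 1 - (k + 19) / 20 % 2 := by omega
        simp [blackAfter, hk, h1, h2, h3]
  · have h1 : (k + 1 + 19) / 20 = (k + 19) / 20 := by omega
    have h2 : ¬ (((k % 20 : Nat) : Int)) = 0 := by
      intro h'; exact hk (by exact_mod_cast h')
    simp [blackAfter, h1]
    omega

-- A's cell value at column k as a closed form on k
lemma cell_val (k : Nat) :
    (if blackAfter (k + 1) then (0 : Int) else 1) =
      (if k % 40 < 20 then (1 : Int) else 0) := by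
  have h3 : (k + 1 + 19) / 20 = k / 20 + 1 := by omega
  rcases Nat.mod_two_eq_zero_or_one (k / 20) with h4 | h4 <;>
    · have h5 : (k / 20 + 1) % 2 = 1 - k / 20 % 2 := by omega
      have h6 : (k % 40 < 20) ↔ (k / 20 % 2 = 0) := by omega
      simp [blackAfter, h3, h4, h5, h6]

-- A's fold over range(k) produces the closed-form row of length k
lemma foldA_range (k : Nat) :
    (PySem.List.pyRange 0 k 1).foldl
      (fun (st : Bool × List Int) j =>
        ((if PySem.Int.mod j 20 == 0 then !st.1 else st.1),
          st.2 ++ [if (if PySem.Int.mod j 20 == 0 then !st.1 else st.1) then (0 : Int) else 1]))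
      (true, []) =
    (blackAfter k, (List.range k).map (fun j => if j % 40 < 20 then (1 : Int) else 0)) := by
  induction k with
  | zero => simp [blackAfter, PySem.List.pyRange_one_eq_nil]
  | succ k ih =>
    have hc : ((k + 1 : Nat) : Int) = (k : Int) + 1 := by push_cast; ring
    rw [hc, PySem.List.pyRange_one_succ_right (a := 0) (b := (k : Int)) (Int.natCast_nonneg k),
      List.foldl_append, ih, List.range_succ, List.map_append]
    simp only [List.foldl_cons, List.foldl_nil, List.map_cons, List.map_nil]
    rw [← blackAfter_step k]
    simp [cell_val k]

-- the 40-element stripe block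
def pat : List Int := List.replicate 20 (1 : Int) ++ List.replicate 20 0

lemma pat_get (m : Nat) (h : m < 40) :
    pat[m]? = some (if m < 20 then (1 : Int) else 0) := by
  unfold pat
  by_cases hm : m < 20
  · rw [List.getElem?_append_left (by simpa using hm), List.getElem?_replicate,
      if_pos hm, if_pos hm]
  · rw [List.getElem?_append_right (by simp; omega), List.getElem?_replicate]
    simp only [List.length_replicate]
    rw [if_pos (by omega), if_neg hm]

lemma flat_get (b i : Nat) (h : i < b * 40) :
    ((List.replicate b pat).flatten)[i]? = pat[i % 40]? := by
  induction b generalizing i with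
  | zero => omega
  | succ b ih =>
    rw [List.replicate_succ, List.flatten_cons]
    by_cases hi : i < 40
    · rw [List.getElem?_append_left (by simp [pat]; omega)]
      congr 1
      omega
    · rw [List.getElem?_append_right (by simp [pat]; omega)]
      have hlen : pat.length = 40 := by simp [pat]
      rw [hlen, ih (i - 40) (by omega)]
      congr 1
      omega

lemma flat_len (b : Nat) : ((List.replicate b pat).flatten).length = b * 40 := by
  induction b with
  | zero => simp
  | succ b ih => rw [List.replicate_succ, List.flatten_cons]; simp [pat] at ih ⊢; omega

-- the closed-form row of length k equals the block row truncated to k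
lemma block_row (k : Nat) :
    ((List.replicate ((k + 39) / 40) pat).flatten).take k =
      (List.range k).map (fun j => if j % 40 < 20 then (1 : Int) else 0) := by
  apply List.ext_getElem?
  intro i
  have hlen : ((List.replicate ((k + 39) / 40) pat).flatten).length = ((k + 39) / 40) * 40 :=
    flat_len _
  by_cases hi : i < k
  · have h1 : i < ((k + 39) / 40) * 40 := by omega
    rw [List.getElem?_take, if_pos hi, flat_get _ i h1,
      pat_get (i % 40) (by omega)]
    have h2 : ((List.range k).map (fun j => if j % 40 < 20 then (1 : Int) else 0))[i]? =
        some (if i % 40 < 20 then (1 : Int) else 0) := by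
      rw [List.getElem?_map, List.getElem?_range hi, Option.map_some]
    rw [h2]
  · have h2 : k ≤ i := by omega
    rw [List.getElem?_take, if_neg hi]
    rw [List.getElem?_eq_none (by simpa using h2)]

lemma rowA_eq (n : Int) :
    matriceRowA n =
      (if n ≤ 0 then ([] : List Int)
       else (List.flatten (List.replicate (PySem.Int.floordiv (n + 39) 40).toNat
               (List.replicate 20 (1 : Int) ++ List.replicate 20 0))).take n.toNat) := by
  by_cases h : n ≤ 0
  · simp [matriceRowA, h, PySem.List.pyRange_one_eq_nil h]
  · have hn : ((n.toNat : Nat) : Int) = n := Int.toNat_of_nonneg (by omega)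
    have hfd : PySem.Int.floordiv (n + 39) 40 = ((n.toNat + 39) / 40 : Nat) := by
      have : (n + 39) = ((n.toNat + 39 : Nat) : Int) := by push_cast; omega
      rw [this]
      exact_mod_cast PySem.Int.floordiv_natCast (n.toNat + 39) 40
    rw [if_neg h, matriceRowA, hfd, ← hn, foldA_range n.toNat]
    simp only [Int.toNat_natCast]
    exact (block_row n.toNat).symm

-- ===== VERDICT (by name: the statement is the Claim_ definition above) =====
theorem matrice_spec : Claim_equal_matrice := by
  intro n p _
  unfold Spec_matrice matrice matrice_alt
  by_cases hp : p ≤ 0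
  · rw [if_pos hp, PySem.List.pyRange_one_eq_nil hp, List.map_nil]
  · rw [if_neg hp, List.map_const', PySem.List.length_pyRange_one, rowA_eq n]
    norm_num
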